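-- pv_equiv track=rewrite | github.com/ramyshaaban/video-library | video_library_app.py | categorize_by_space
-- ===== SOURCE A (Python) =====
-- from collections import defaultdict
--
-- def categorize_by_space(videos):
--     """Group videos by space name"""
--     spaces = defaultdict(list)
--     for video in videos:
--         space_name = video.get('space_name', 'Unknown Space')
--         if not space_name or space_name == '':
--             space_name = 'Unknown Space'
--         spaces[space_name].append(video)
--     return dict(spaces)
-- ===== SOURCE B (Python) =====
-- def categorize_by_space(videos):
--     """Group videos by space name"""
--     def key(video):
--         name = video.get('space_name', 'Unknown Space')
--         return name if name else 'Unknown Space'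
--     keys = list(dict.fromkeys(key(v) for v in videos))
--     return {k: [v for v in videos if key(v) == k] for k in keys}
-- ===== Notes on version B (the rewrite author's own statement) =====
-- stated objective: alternative
-- what changed: Replaces the one-pass defaultdict-append loop by a two-phase scheme: first collect the distinct normalized space names in first-occurrence order via dict.fromkeys, then build each group with a filter pass over the videos.
import Mathlib
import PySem

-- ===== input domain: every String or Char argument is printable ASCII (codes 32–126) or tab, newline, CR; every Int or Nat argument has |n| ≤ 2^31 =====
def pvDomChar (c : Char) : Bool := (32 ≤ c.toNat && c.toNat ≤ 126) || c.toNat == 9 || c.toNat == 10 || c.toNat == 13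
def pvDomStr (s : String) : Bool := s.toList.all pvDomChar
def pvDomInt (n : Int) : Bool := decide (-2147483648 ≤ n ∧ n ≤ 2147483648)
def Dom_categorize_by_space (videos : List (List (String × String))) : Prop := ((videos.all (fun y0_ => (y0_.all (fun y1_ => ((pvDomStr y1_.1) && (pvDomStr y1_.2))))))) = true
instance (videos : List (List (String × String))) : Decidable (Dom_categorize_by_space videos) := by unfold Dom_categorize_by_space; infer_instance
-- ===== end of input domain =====

-- ===== PORT A =====
-- Port of A: one fold over videos maintaining a defaultdict(list), then its items.
def categorize_by_space (videos : List (List (String × String))) : List (String × List (List (String × String))) :=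
  (videos.foldl (fun (spaces : PySem.Dict String (List (List (String × String)))) video =>
      let space_name := (PySem.Dict.mk video).getD "space_name" "Unknown Space"
      let space_name := if space_name = "" ∨ space_name = "" then "Unknown Space" else space_name
      spaces.modify space_name [] (fun l => l ++ [video]))
    PySem.Dict.empty).items

-- ===== PORT B =====
-- B: distinct normalized keys in first-occurrence order, then one filter pass per key.
def pvKeyB (video : List (String × String)) : String :=
  let name := (PySem.Dict.mk video).getD "space_name" "Unknown Space"
  if name = "" then "Unknown Space" else name

def categorize_by_space_alt (videos : List (List (String × String))) : List (String × List (List (String × String))) :=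
  let keys := PySem.List.dedup (videos.map pvKeyB)
  keys.map (fun k => (k, videos.filter (fun v => pvKeyB v == k)))

-- ===== PRECONDITION & SPEC =====
def Spec_categorize_by_space (videos : List (List (String × String))) (out : List (String × List (List (String × String)))) : Prop := out = categorize_by_space_alt videos
instance (videos : List (List (String × String))) (out : List (String × List (List (String × String)))) : Decidable (Spec_categorize_by_space videos out) := by unfold Spec_categorize_by_space; infer_instance

-- ===== CLAIM (what is proved, stated in full; the proofs are below) =====
def Claim_equal_categorize_by_space : Prop := ∀ (videos : List (List (String × String))), Dom_categorize_by_space videos → Spec_categorize_by_space videos (categorize_by_space videos)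

-- ===== LEMMAS AND PROOFS =====

-- ===== VERDICT (by name: the statement is the Claim_ definition above) =====
theorem categorize_by_space_spec : Claim_equal_categorize_by_space := by
  intro videos _
  unfold Spec_categorize_by_space categorize_by_space categorize_by_space_alt
  have hbody : (fun (spaces : PySem.Dict String (List (List (String × String)))) video =>
      let space_name := (PySem.Dict.mk video).getD "space_name" "Unknown Space"
      let space_name := if space_name = "" ∨ space_name = "" then "Unknown Space" else space_name
      spaces.modify space_name [] (fun l => l ++ [video]))
      = fun spaces video => spaces.modify (pvKeyB video) [] (fun l => l ++ [video]) := by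
    funext spaces video
    simp only [pvKeyB, or_self]
  rw [hbody]
  set D := videos.foldl (fun d v => d.modify (pvKeyB v) [] (fun l => l ++ [v])) PySem.Dict.empty with hD
  have hnd : D.keys.Nodup := by
    rw [hD]
    exact PySem.Dict.nodup_keys_foldl_modify_key videos pvKeyB [] (fun d v => (fun l => l ++ [v]))
      PySem.Dict.empty (by simp [PySem.Dict.keys_empty])
  have hkeys : D.keys = PySem.List.dedup (videos.map pvKeyB) := by
    rw [hD]
    rw [PySem.Dict.keys_foldl_modify_key]
    simp [PySem.Dict.keys_empty, PySem.Set.update_nil_left]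
  have hg : ∀ c, D.getD c [] = videos.filter (fun v => pvKeyB v == c) := by
    intro c
    have hm : D = (videos.map (fun v => (pvKeyB v, v))).foldl
        (fun d p => d.modify p.1 [] (fun l => l ++ [p.2])) PySem.Dict.empty := by
      rw [hD, List.foldl_map]
    rw [hm, PySem.Dict.getD_foldl_modify_append]
    simp [PySem.Dict.getD_empty, List.filter_map, Function.comp_def, List.map_map]
  rw [PySem.Dict.items_eq_map_keys D hnd [], hkeys]
  exact List.map_congr_left (fun k _ => by rw [hg k])
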